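-- pv_equiv track=rewrite | github.com/alegottu/gawk-trees | tools/benchmark/mem_benchmark.py | create_nested_fors
-- ===== SOURCE A (Python) =====
-- from functools import reduce
--
-- def concat_args(arg1, arg2):
--     return arg1 + ", " + arg2
--
-- def create_nested_fors(dimensions, name, command, args=[""], use_ext=True):
--     n = len(dimensions)
--     loops =""
--     tab = "    "
--     body = f'{command}("{name}", ' if use_ext else command + f" {name}"
--
--     for i in range(1, n+1):
--         iter_var = chr(96+i)
--         loops += tab * i
--         loops += f"for ({iter_var}=0; {iter_var}<{dimensions[i-1]}; {iter_var}++)\n"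
--         loops += tab * i
--         loops += "{\n"
--         body += f"{iter_var}, " if use_ext else f"[{iter_var}]"
--     else:
--         body += f"{reduce(concat_args, args)})\n" if use_ext else reduce(str.__add__, args) + "\n"
--         body = (tab * (n+1)) + body
--         loops += body
--
--     for i in range(n, 0, -1):
--         loops += tab * i
--         loops += "}\n"
--
--     return loops
-- ===== SOURCE B (Python) =====
-- def create_nested_fors(dimensions, name, command, args=[""], use_ext=True):
--     tab = "    "
--     n = len(dimensions)
--
--     def join_rest(lst):
--         # recursive join: ", "-separated for the ext form, plain concatenation otherwise
--         if len(lst) == 1: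
--             return lst[0]
--         mid = ", " if use_ext else ""
--         return lst[0] + mid + join_rest(lst[1:])
--
--     def gen(level, params):
--         # emit one for-level, recurse inward, then close it; base emits the body line
--         if level > n:
--             if use_ext:
--                 stmt = command + '("' + name + '", ' + params + join_rest(args) + ")\n"
--             else:
--                 stmt = command + " " + name + params + join_rest(args) + "\n"
--             return tab * (n + 1) + stmt
--         v = chr(96 + level)
--         head = (tab * level + f"for ({v}=0; {v}<{dimensions[level-1]}; {v}++)\n"
--                 + tab * level + "{\n")
--         p = v + ", " if use_ext else "[" + v + "]"
--         return head + gen(level + 1, params + p) + tab * level + "}\n"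
--
--     return gen(1, "")
-- ===== Notes on version B (the rewrite author's own statement) =====
-- stated objective: alternative
-- what changed: Replaces A's two iterative passes (a forward loop threading two string accumulators for the for-lines and the body parameters, then a separate backward loop for the closing braces) and functools.reduce joins by a single recursive descent gen(level) that emits each for-line, recurses inward accumulating the parameter string, emits the matching closing brace on the way back out, and assembles the body via a recursive join helper at the base case.
import Mathlib
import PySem

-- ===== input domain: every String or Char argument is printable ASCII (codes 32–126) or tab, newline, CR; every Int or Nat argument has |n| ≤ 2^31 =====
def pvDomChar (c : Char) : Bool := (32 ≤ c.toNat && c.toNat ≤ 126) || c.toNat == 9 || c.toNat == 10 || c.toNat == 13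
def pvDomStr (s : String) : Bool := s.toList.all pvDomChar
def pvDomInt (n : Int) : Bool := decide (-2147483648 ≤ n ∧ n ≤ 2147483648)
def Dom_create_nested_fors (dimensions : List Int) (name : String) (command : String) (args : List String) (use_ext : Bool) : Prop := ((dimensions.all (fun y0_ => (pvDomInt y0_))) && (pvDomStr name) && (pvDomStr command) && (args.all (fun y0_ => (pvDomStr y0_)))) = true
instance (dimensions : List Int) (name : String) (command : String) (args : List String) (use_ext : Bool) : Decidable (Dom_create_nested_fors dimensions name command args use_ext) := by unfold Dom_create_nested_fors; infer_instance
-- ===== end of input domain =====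

-- B replaces A's two accumulator-threading loops and reduce-joins by one recursive descent that
-- emits each for-line, recurses inward, and closes the brace on the way out (objective:
-- alternative decomposition, same cost).

-- ===== PORT A =====
-- Python's 's * k' (string repetition; k ≤ 0 gives ""), shared by both ports
def pvStrMul (s : String) (k : Nat) : String := String.join (List.replicate k s)

def concat_args (arg1 : String) (arg2 : String) : String := arg1 ++ ", " ++ arg2

def create_nested_fors (dimensions : List Int) (name : String) (command : String) (args : List String) (use_ext : Bool) : String :=
  let n := dimensions.length
  let loops := ""
  let tab := "    "
  let body := if use_ext then command ++ "(\"" ++ name ++ "\", " else command ++ " " ++ name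
  -- for i in range(1, n+1): accumulate (loops, body); dimensions[i-1] is always in range
  let st := (PySem.List.pyRange 1 ((n : Int) + 1) 1).foldl
    (fun (st : String × String) i =>
      (st.1 ++ pvStrMul tab i.toNat ++
         ("for (" ++ String.mk [Char.ofNat (96 + i).toNat] ++ "=0; " ++
          String.mk [Char.ofNat (96 + i).toNat] ++ "<" ++
          PySem.Int.toStr (PySem.List.pyGetD dimensions (i - 1) 0) ++ "; " ++
          String.mk [Char.ofNat (96 + i).toNat] ++ "++)\n") ++
       pvStrMul tab i.toNat ++ "{\n",
       st.2 ++ (if use_ext then String.mk [Char.ofNat (96 + i).toNat] ++ ", "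
                else "[" ++ String.mk [Char.ofNat (96 + i).toNat] ++ "]")))
    (loops, body)
  -- for...else clause: reduce(concat_args, args) / reduce(str.__add__, args); [] raises → outside Pre_
  let body2 := st.2 ++ (if use_ext then (match args with | [] => "" | x :: xs => xs.foldl concat_args x) ++ ")\n"
                        else (match args with | [] => "" | x :: xs => xs.foldl (· ++ ·) x) ++ "\n")
  let body3 := pvStrMul tab (n + 1) ++ body2
  let loops2 := st.1 ++ body3
  -- for i in range(n, 0, -1)
  (PySem.List.pyRange (n : Int) 0 (-1)).foldl (fun l i => l ++ pvStrMul tab i.toNat ++ "}\n") loops2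

-- ===== PORT B =====
-- Source B's join_rest: recursive join over args ([] raises IndexError in Python → outside Pre_)
def pvJoinRest (use_ext : Bool) : List String → String
  | [] => ""
  | [x] => x
  | x :: y :: r => x ++ (if use_ext then ", " else "") ++ pvJoinRest use_ext (y :: r)

-- Source B's gen(level, params): emit one for-level, recurse inward, close it on the way out
def pvGen (dimensions : List Int) (name : String) (command : String) (args : List String)
    (use_ext : Bool) (n : Nat) (level : Nat) (params : String) : String :=
  if n < level then
    pvStrMul "    " (n + 1) ++
      (if use_ext then
        command ++ "(\"" ++ name ++ "\", " ++ params ++ pvJoinRest use_ext args ++ ")\n"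
      else
        command ++ " " ++ name ++ params ++ pvJoinRest use_ext args ++ "\n")
  else
    -- v = chr(96+level); head = the two indented lines; p = the parameter fragment (inlined locals)
    pvStrMul "    " level ++
      ("for (" ++ String.mk [Char.ofNat (96 + level)] ++ "=0; " ++
       String.mk [Char.ofNat (96 + level)] ++ "<" ++
       PySem.Int.toStr (PySem.List.pyGetD dimensions ((level : Int) - 1) 0) ++ "; " ++
       String.mk [Char.ofNat (96 + level)] ++ "++)\n") ++
      pvStrMul "    " level ++ "{\n" ++
    pvGen dimensions name command args use_ext n (level + 1)
      (params ++ (if use_ext then String.mk [Char.ofNat (96 + level)] ++ ", "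
                  else "[" ++ String.mk [Char.ofNat (96 + level)] ++ "]")) ++
      pvStrMul "    " level ++ "}\n"
termination_by n + 1 - level

def create_nested_fors_alt (dimensions : List Int) (name : String) (command : String) (args : List String) (use_ext : Bool) : String :=
  let n := dimensions.length
  pvGen dimensions name command args use_ext n 1 ""

-- ===== PRECONDITION & SPEC =====
-- Pre_ excludes args = [], on which A's reduce(...) raises TypeError (and B's join_rest an IndexError).
def Pre_create_nested_fors (dimensions : List Int) (name : String) (command : String) (args : List String) (use_ext : Bool) : Prop := args ≠ []
instance (dimensions : List Int) (name : String) (command : String) (args : List String) (use_ext : Bool) : Decidable (Pre_create_nested_fors dimensions name command args use_ext) := by unfold Pre_create_nested_fors; infer_instance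

def pvWitness_create_nested_fors : List Int × String × String × List String × Bool := ([2, 3], "arr", "delete", ["x"], true)

def Spec_create_nested_fors (dimensions : List Int) (name : String) (command : String) (args : List String) (use_ext : Bool) (out : String) : Prop := out = create_nested_fors_alt dimensions name command args use_ext
instance (dimensions : List Int) (name : String) (command : String) (args : List String) (use_ext : Bool) (out : String) : Decidable (Spec_create_nested_fors dimensions name command args use_ext out) := by unfold Spec_create_nested_fors; infer_instance

-- ===== CLAIM (what is proved, stated in full; the proofs are below) =====
def Claim_equal_create_nested_fors : Prop := ∀ (dimensions : List Int) (name : String) (command : String) (args : List String) (use_ext : Bool), Dom_create_nested_fors dimensions name command args use_ext → Pre_create_nested_fors dimensions name command args use_ext → Spec_create_nested_fors dimensions name command args use_ext (create_nested_fors dimensions name command args use_ext)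

-- ===== LEMMAS AND PROOFS =====

-- per-level strings (Int index, as produced by A's loops)
def pvF (dimensions : List Int) (i : Int) : String :=
  pvStrMul "    " i.toNat ++
    ("for (" ++ String.mk [Char.ofNat (96 + i).toNat] ++ "=0; " ++
     String.mk [Char.ofNat (96 + i).toNat] ++ "<" ++
     PySem.Int.toStr (PySem.List.pyGetD dimensions (i - 1) 0) ++ "; " ++
     String.mk [Char.ofNat (96 + i).toNat] ++ "++)\n") ++
  pvStrMul "    " i.toNat ++ "{\n"

def pvG (use_ext : Bool) (i : Int) : String :=
  if use_ext then String.mk [Char.ofNat (96 + i).toNat] ++ ", "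
  else "[" ++ String.mk [Char.ofNat (96 + i).toNat] ++ "]"

def pvC (i : Int) : String := pvStrMul "    " i.toNat ++ "}\n"

-- per-level strings (Nat index, as produced by B's recursion)
def pvFN (dimensions : List Int) (i : Nat) : String :=
  pvStrMul "    " i ++
    ("for (" ++ String.mk [Char.ofNat (96 + i)] ++ "=0; " ++
     String.mk [Char.ofNat (96 + i)] ++ "<" ++
     PySem.Int.toStr (PySem.List.pyGetD dimensions ((i : Int) - 1) 0) ++ "; " ++
     String.mk [Char.ofNat (96 + i)] ++ "++)\n") ++
  pvStrMul "    " i ++ "{\n"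

def pvGN (use_ext : Bool) (i : Nat) : String :=
  if use_ext then String.mk [Char.ofNat (96 + i)] ++ ", "
  else "[" ++ String.mk [Char.ofNat (96 + i)] ++ "]"

def pvCN (i : Nat) : String := pvStrMul "    " i ++ "}\n"

def pvBase (name : String) (command : String) (args : List String) (use_ext : Bool) (n : Nat)
    (params : String) : String :=
  pvStrMul "    " (n + 1) ++
    (if use_ext then
      command ++ "(\"" ++ name ++ "\", " ++ params ++ pvJoinRest use_ext args ++ ")\n"
    else
      command ++ " " ++ name ++ params ++ pvJoinRest use_ext args ++ "\n")

def pvCatS : List String → String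
  | [] => ""
  | x :: xs => x ++ pvCatS xs

def pvCat (f : Int → String) (l : List Int) : String := pvCatS (l.map f)

theorem pvCatS_append : ∀ (l1 l2 : List String), pvCatS (l1 ++ l2) = pvCatS l1 ++ pvCatS l2
  | [], l2 => by simp [pvCatS]
  | x :: xs, l2 => by simp [pvCatS, pvCatS_append xs l2, String.append_assoc]

theorem pvFoldl_cat (f : Int → String) : ∀ (lst : List Int) (l : String),
    lst.foldl (fun a i => a ++ f i) l = l ++ pvCat f lst
  | [], l => by simp [pvCat, pvCatS]
  | i :: is, l => by
      simp only [List.foldl_cons, pvFoldl_cat f is, pvCat, List.map_cons, pvCatS,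
        String.append_assoc]

theorem pvJR_append_head (ue : Bool) (p y : String) : ∀ (r : List String),
    pvJoinRest ue ((p ++ y) :: r) = p ++ pvJoinRest ue (y :: r)
  | [] => by simp [pvJoinRest]
  | z :: zs => by simp [pvJoinRest, String.append_assoc]

theorem pvFoldl_JR (ue : Bool) : ∀ (ys : List String) (x : String),
    ys.foldl (fun a b => a ++ (if ue then ", " else "") ++ b) x = pvJoinRest ue (x :: ys)
  | [], x => by simp [pvJoinRest]
  | y :: ys, x => by
      rw [List.foldl_cons, pvFoldl_JR ue ys (x ++ (if ue then ", " else "") ++ y)]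
      rw [show x ++ (if ue then ", " else "") ++ y = x ++ ((if ue then ", " else "") ++ y) from
        by simp [String.append_assoc]]
      rw [pvJR_append_head ue x ((if ue then ", " else "") ++ y) ys]
      cases ys with
      | nil => simp [pvJoinRest, String.append_assoc]
      | cons z zs =>
          rw [show ((if ue then ", " else "") ++ y) :: z :: zs
              = ((if ue then ", " else "") ++ y) :: z :: zs from rfl]
          rw [pvJR_append_head ue (if ue then ", " else "") y (z :: zs)]
          simp [pvJoinRest, String.append_assoc]

-- B's recursion in canonical form
theorem pvGen_spec (dimensions : List Int) (name : String) (command : String)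
    (args : List String) (use_ext : Bool) (n : Nat) :
    ∀ (m : Nat) (level : Nat) (params : String), level = n + 1 - m → m ≤ n →
    pvGen dimensions name command args use_ext n level params =
      pvCatS ((List.range' level m).map (pvFN dimensions)) ++
      pvBase name command args use_ext n
        (params ++ pvCatS ((List.range' level m).map (pvGN use_ext))) ++
      pvCatS (((List.range' level m).reverse).map pvCN)
  | 0, level, params, hl, _ => by
      subst hl
      rw [pvGen]
      simp [pvBase, pvCatS]
  | m + 1, level, params, hl, hm => by
      have hlev : level = n - m := by omega
      have hnl : ¬ n < level := by omega
      rw [pvGen, if_neg hnl]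
      rw [pvGen_spec dimensions name command args use_ext n m (level + 1) _
        (by omega) (by omega)]
      rw [List.range'_succ]
      simp only [List.map_cons, pvCatS, List.reverse_cons, List.map_append, pvCatS_append,
        List.map_nil]
      simp [pvFN, pvGN, pvCN, String.append_assoc]

-- index conversions between A's Int levels and B's Nat levels
theorem pvF_conv (dimensions : List Int) (k : Nat) :
    pvF dimensions (1 + (k : Int)) = pvFN dimensions (k + 1) := by
  unfold pvF pvFN
  have h1 : ((1 : Int) + (k : Int)).toNat = k + 1 := by omega
  have h2 : ((96 : Int) + (1 + (k : Int))).toNat = 96 + (k + 1) := by omega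
  have h3 : (1 : Int) + (k : Int) - 1 = ((k + 1 : Nat) : Int) - 1 := by push_cast; ring
  rw [h1, h2, h3]

theorem pvG_conv (use_ext : Bool) (k : Nat) :
    pvG use_ext (1 + (k : Int)) = pvGN use_ext (k + 1) := by
  unfold pvG pvGN
  have h2 : ((96 : Int) + (1 + (k : Int))).toNat = 96 + (k + 1) := by omega
  rw [h2]

theorem pvC_conv (k : Nat) : pvC (1 + (k : Int)) = pvCN (k + 1) := by
  unfold pvC pvCN
  have h1 : ((1 : Int) + (k : Int)).toNat = k + 1 := by omega
  rw [h1]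

theorem pvRange'_map (f : Int → String) (g : Nat → String) (n : Nat)
    (h : ∀ k : Nat, f (1 + (k : Int)) = g (k + 1)) :
    (PySem.List.pyRange 1 ((n : Int) + 1) 1).map f = (List.range' 1 n).map g := by
  rw [PySem.List.pyRange_one, List.range'_eq_map_range]
  have hn : (((n : Int) + 1) - 1).toNat = n := by omega
  rw [hn, List.map_map, List.map_map]
  apply List.map_congr_left
  intro k _
  simp only [Function.comp]
  rw [h k, Nat.add_comm 1 k]

theorem create_nested_fors_eq_alt (dimensions : List Int) (name : String) (command : String)
    (args : List String) (use_ext : Bool) (hpre : args ≠ []) :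
    create_nested_fors dimensions name command args use_ext =
      create_nested_fors_alt dimensions name command args use_ext := by
  obtain ⟨a0, arest, rfl⟩ : ∃ a0 arest, args = a0 :: arest := by
    cases args with
    | nil => exact absurd rfl hpre
    | cons a0 arest => exact ⟨a0, arest, rfl⟩
  unfold create_nested_fors create_nested_fors_alt
  simp only []
  -- A's forward loop as a pair of concatenations
  have hstep : (fun (st : String × String) (i : Int) =>
      (st.1 ++ pvStrMul "    " i.toNat ++
         ("for (" ++ String.mk [Char.ofNat (96 + i).toNat] ++ "=0; " ++
          String.mk [Char.ofNat (96 + i).toNat] ++ "<" ++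
          PySem.Int.toStr (PySem.List.pyGetD dimensions (i - 1) 0) ++ "; " ++
          String.mk [Char.ofNat (96 + i).toNat] ++ "++)\n") ++
       pvStrMul "    " i.toNat ++ "{\n",
       st.2 ++ (if use_ext then String.mk [Char.ofNat (96 + i).toNat] ++ ", "
                else "[" ++ String.mk [Char.ofNat (96 + i).toNat] ++ "]")))
      = fun (st : String × String) (i : Int) => (st.1 ++ pvF dimensions i, st.2 ++ pvG use_ext i) := by
    funext st i
    simp [pvF, pvG, String.append_assoc]
  rw [hstep, PySem.List.foldl_prod_mk (fun (a : String) (i : Int) => a ++ pvF dimensions i)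
    (fun (a : String) (i : Int) => a ++ pvG use_ext i),
    pvFoldl_cat (pvF dimensions), pvFoldl_cat (pvG use_ext)]
  -- A's backward loop
  have hclose : (fun (l : String) (i : Int) => l ++ pvStrMul "    " i.toNat ++ "}\n")
      = fun (l : String) (i : Int) => l ++ pvC i := by
    funext l i
    simp [pvC, String.append_assoc]
  rw [hclose, pvFoldl_cat pvC]
  -- A's reduce-joins are B's recursive join
  have hred : (arest.foldl concat_args a0) = pvJoinRest true (a0 :: arest) := by
    rw [show concat_args = fun a b => a ++ (if true then ", " else "") ++ b from by
      funext a b; simp [concat_args]]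
    exact pvFoldl_JR true arest a0
  have hadd : (arest.foldl (· ++ ·) a0) = pvJoinRest false (a0 :: arest) := by
    rw [show (fun (a b : String) => a ++ b) = fun a b => a ++ (if false then ", " else "") ++ b from
      by funext a b; simp]
    exact pvFoldl_JR false arest a0
  -- B in canonical form
  rw [pvGen_spec dimensions name command (a0 :: arest) use_ext dimensions.length
    dimensions.length 1 "" (by omega) (le_refl _)]
  -- align the level lists
  rw [pvCat, pvCat, pvCat,
    pvRange'_map (pvF dimensions) (pvFN dimensions) dimensions.length
      (pvF_conv dimensions),
    show PySem.List.pyRange (dimensions.length : Int) 0 (-1)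
        = (PySem.List.pyRange 1 ((dimensions.length : Int) + 1) 1).reverse from by
      rw [PySem.List.pyRange_neg_one_eq_reverse]; norm_num,
    List.map_reverse, List.map_reverse,
    pvRange'_map pvC pvCN dimensions.length pvC_conv,
    pvRange'_map (pvG use_ext) (pvGN use_ext) dimensions.length (pvG_conv use_ext)]
  rw [hred, hadd]
  cases use_ext <;> simp [pvBase, String.append_assoc]

-- ===== VERDICT (by name: the statement is the Claim_ definition above) =====
theorem create_nested_fors_spec : Claim_equal_create_nested_fors := by
  intro dimensions name command args use_ext _ hpre
  unfold Spec_create_nested_fors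
  exact create_nested_fors_eq_alt dimensions name command args use_ext hpre
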